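-- pv_equiv track=rewrite | github.com/mderoullers/rex-automate-assessments | terraform/source/main.py | error_handling
-- ===== SOURCE A (Python) =====
-- def is_other_remote_call(values):
--     for value in values:
--         if value != "App crash" and value != "Blocked Threads" and value != "App Stops" and value != "Error message" and value != "Circuit breaker":
--             return True
--     return False
--
-- def is_other_crash_recovery(value):
--     if value == "Manual repair and restart" or value == "Manual restart" or \
--             value == "Automatic restart but data initialisation time required (more than 5 minutes)" or value == "Automatic fast restart (within 2 or 3 minutes)":
--         return False
--     return True
--
-- def error_handling(remote_call_failure, app_crash_recovery):
--     if is_other_remote_call(remote_call_failure) or is_other_crash_recovery(app_crash_recovery):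
--         return "?"
--     for value in remote_call_failure:
--         if value == "App crash" or value == "App Stops" or app_crash_recovery == "Manual repair and restart" or \
--                 app_crash_recovery == "Manual restart":
--             return "KO"
--         if value == "Blocked Threads" or app_crash_recovery == "Automatic restart but data initialisation time required (more than 5 minutes)":
--             return "WARN"
--         if (
--                 value == "Error message" or value == "Circuit breaker") and app_crash_recovery == "Automatic fast restart (within 2 or 3 minutes)":
--             return "OK"
-- ===== SOURCE B (Python) =====
-- # Severity-lattice formulation: each category gets a numeric severity rank
-- # (OK=0, WARN=1, KO=2); the verdict is the max (join) of the first failure's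
-- # rank and the recovery's rank; unknown categories rank as None -> '?'.
--
-- _FAILURE_SEVERITY = {
--     "App crash": 2,
--     "App Stops": 2,
--     "Blocked Threads": 1,
--     "Error message": 0,
--     "Circuit breaker": 0,
-- }
-- _RECOVERY_SEVERITY = {
--     "Manual repair and restart": 2,
--     "Manual restart": 2,
--     "Automatic restart but data initialisation time required (more than 5 minutes)": 1,
--     "Automatic fast restart (within 2 or 3 minutes)": 0,
-- }
-- _VERDICT = ["OK", "WARN", "KO"]
--
-- def error_handling(remote_call_failure, app_crash_recovery):
--     ranks = [_FAILURE_SEVERITY.get(v) for v in remote_call_failure]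
--     r = _RECOVERY_SEVERITY.get(app_crash_recovery)
--     if r is None or None in ranks:
--         return "?"
--     if not ranks:
--         return None
--     return _VERDICT[max(ranks[0], r)]
-- ===== Notes on version B (the rewrite author's own statement) =====
-- stated objective: alternative
-- what changed: Replaces A's chain of conditional-return branches by an arithmetic severity lattice: each failure/recovery category maps to a numeric rank (OK=0, WARN=1, KO=2, unknown=None), and the verdict is the verdict name indexed by max(rank of first failure, rank of recovery); '?' when any rank is None, None on an empty valid list.
import Mathlib
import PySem

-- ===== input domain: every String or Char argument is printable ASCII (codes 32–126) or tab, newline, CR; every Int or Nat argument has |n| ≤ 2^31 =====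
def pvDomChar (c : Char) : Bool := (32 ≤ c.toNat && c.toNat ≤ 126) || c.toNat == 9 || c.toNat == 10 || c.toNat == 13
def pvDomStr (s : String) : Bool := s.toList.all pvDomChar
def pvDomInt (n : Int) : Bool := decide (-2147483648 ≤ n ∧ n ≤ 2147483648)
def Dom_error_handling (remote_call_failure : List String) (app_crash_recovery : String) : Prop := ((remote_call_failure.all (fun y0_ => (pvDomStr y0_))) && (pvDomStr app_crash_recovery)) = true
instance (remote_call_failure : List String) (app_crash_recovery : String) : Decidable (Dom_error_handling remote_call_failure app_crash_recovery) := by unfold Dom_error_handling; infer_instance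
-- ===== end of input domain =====

set_option maxRecDepth 4000


-- B replaces A's conditional-return branch chain by a numeric severity lattice (verdict = max of two ranks); alternative decomposition, same O(n) cost.

-- ===== PORT A =====
def is_other_remote_call : List String → Bool
  | [] => false
  | value :: rest =>
    if value != "App crash" && value != "Blocked Threads" && value != "App Stops" && value != "Error message" && value != "Circuit breaker" then
      true
    else
      is_other_remote_call rest

def is_other_crash_recovery (value : String) : Bool :=
  if value == "Manual repair and restart" || value == "Manual restart" ||
      value == "Automatic restart but data initialisation time required (more than 5 minutes)" || value == "Automatic fast restart (within 2 or 3 minutes)" then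
    false
  else
    true

def error_handling_loop (app_crash_recovery : String) : List String → Option String
  | [] => none
  | value :: rest =>
    if value == "App crash" || value == "App Stops" || app_crash_recovery == "Manual repair and restart" ||
        app_crash_recovery == "Manual restart" then
      some "KO"
    else if value == "Blocked Threads" || app_crash_recovery == "Automatic restart but data initialisation time required (more than 5 minutes)" then
      some "WARN"
    else if (value == "Error message" || value == "Circuit breaker") && app_crash_recovery == "Automatic fast restart (within 2 or 3 minutes)" then
      some "OK"
    else
      error_handling_loop app_crash_recovery rest

def error_handling (remote_call_failure : List String) (app_crash_recovery : String) : Option String :=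
  if is_other_remote_call remote_call_failure || is_other_crash_recovery app_crash_recovery then
    some "?"
  else
    error_handling_loop app_crash_recovery remote_call_failure

-- ===== PORT B =====
-- _FAILURE_SEVERITY.get(v)
def failSev? (v : String) : Option Nat :=
  if v == "App crash" then some 2
  else if v == "App Stops" then some 2
  else if v == "Blocked Threads" then some 1
  else if v == "Error message" then some 0
  else if v == "Circuit breaker" then some 0
  else none

-- _RECOVERY_SEVERITY.get(app_crash_recovery)
def recSev? (v : String) : Option Nat :=
  if v == "Manual repair and restart" then some 2
  else if v == "Manual restart" then some 2
  else if v == "Automatic restart but data initialisation time required (more than 5 minutes)" then some 1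
  else if v == "Automatic fast restart (within 2 or 3 minutes)" then some 0
  else none

-- _VERDICT[s]
def verdictName (s : Nat) : String := (["OK", "WARN", "KO"] : List String).getD s ""

def error_handling_alt (remote_call_failure : List String) (app_crash_recovery : String) : Option String :=
  let ranks := remote_call_failure.map failSev?
  match recSev? app_crash_recovery with
  | none => some "?"
  | some r =>
    if ranks.contains none then some "?"
    else
      match ranks with
      | [] => none
      | h :: _ => some (verdictName (max (h.getD 0) r))  -- h is some _ here: ranks has no none

-- ===== PRECONDITION & SPEC =====
def Spec_error_handling (remote_call_failure : List String) (app_crash_recovery : String) (out : Option String) : Prop := out = error_handling_alt remote_call_failure app_crash_recovery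
instance (remote_call_failure : List String) (app_crash_recovery : String) (out : Option String) : Decidable (Spec_error_handling remote_call_failure app_crash_recovery out) := by unfold Spec_error_handling; infer_instance

-- ===== CLAIM (what is proved, stated in full; the proofs are below) =====
def Claim_equal_error_handling : Prop := ∀ (remote_call_failure : List String) (app_crash_recovery : String), Dom_error_handling remote_call_failure app_crash_recovery → Spec_error_handling remote_call_failure app_crash_recovery (error_handling remote_call_failure app_crash_recovery)

-- ===== LEMMAS AND PROOFS =====

-- A's list validator agrees with "some failure rank is None".
lemma other_eq_contains_none (xs : List String) :
    is_other_remote_call xs = (xs.map failSev?).contains none := by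
  induction xs with
  | nil => rfl
  | cons v rest ih =>
    simp only [is_other_remote_call, List.map_cons, List.contains_cons, ih, failSev?]
    by_cases h1 : v = "App crash" <;> by_cases h2 : v = "Blocked Threads" <;>
      by_cases h3 : v = "App Stops" <;> by_cases h4 : v = "Error message" <;>
      by_cases h5 : v = "Circuit breaker" <;> simp [h1, h2, h3, h4, h5]

-- A's recovery validator agrees with "recovery rank is None".
lemma other_recovery_eq_isNone (v : String) :
    is_other_crash_recovery v = (recSev? v).isNone := by
  simp only [is_other_crash_recovery, recSev?]
  split_ifs with h <;> simp_all

-- The unconditional core equivalence.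
lemma main_eq (rcf : List String) (ac : String) :
    error_handling rcf ac = error_handling_alt rcf ac := by
  unfold error_handling error_handling_alt
  rw [other_eq_contains_none, other_recovery_eq_isNone]
  cases hr : recSev? ac with
  | none => simp
  | some r =>
    simp only [Option.isNone_some, Bool.or_false]
    cases hc : (rcf.map failSev?).contains none with
    | true => simp
    | false =>
      simp only [Bool.false_eq_true, if_false]
      cases rcf with
      | nil => rfl
      | cons v rest =>
        have hv : failSev? v ≠ none := by
          intro he
          rw [List.map_cons, List.contains_cons, he] at hc
          simp at hc
        -- enumerate the five known failures and four known recoveries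
        have hvcases : v = "App crash" ∨ v = "App Stops" ∨ v = "Blocked Threads" ∨
            v = "Error message" ∨ v = "Circuit breaker" := by
          revert hv; unfold failSev?
          split_ifs with c1 c2 c3 c4 c5 <;> intro _ <;> simp_all
        have hrcases : ac = "Manual repair and restart" ∨ ac = "Manual restart" ∨
            ac = "Automatic restart but data initialisation time required (more than 5 minutes)" ∨
            ac = "Automatic fast restart (within 2 or 3 minutes)" := by
          revert hr; unfold recSev?
          split_ifs with d1 d2 d3 d4 <;> intro hh <;> simp_all
        rcases hvcases with h|h|h|h|h <;> rcases hrcases with g|g|g|g <;> subst h <;> subst g <;>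
          (injection hr with hr; subst hr; rfl)

-- ===== VERDICT (by name: the statement is the Claim_ definition above) =====
theorem error_handling_spec : Claim_equal_error_handling := by
  intro rcf ac _
  unfold Spec_error_handling
  exact main_eq rcf ac
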